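-- pv_equiv track=rewrite | github.com/ebullient/advent-python | src/2023/day-01.py | prep_value
-- ===== SOURCE A (Python) =====
-- def prep_value(input_string):
--     replacements = {
--         'one': '1',
--         'two': '2',
--         'three': '3',
--         'four': '4',
--         'five': '5',
--         'six': '6',
--         'seven': '7',
--         'eight': '8',
--         'nine': '9'
--     }
--     i = 0
--     result = ''
--     while i < len(input_string):
--         if input_string[i].isdigit():
--             result += input_string[i]
--             i += 1
--             continue
--         found = False
--         for( key, value ) in replacements.items():
--             if input_string[i:i+len(key)] == key:
--                 found = True
--                 result += value
--                 i += len(key) - 1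
--                 break
--         if not found:
--             i += 1
--     return result
-- ===== SOURCE B (Python) =====
-- def prep_value(input_string):
--     replacements = {
--         'one': '1', 'two': '2', 'three': '3', 'four': '4', 'five': '5',
--         'six': '6', 'seven': '7', 'eight': '8', 'nine': '9'
--     }
--     matches = [(i, ch) for i, ch in enumerate(input_string) if ch.isdigit()]
--     for word, digit in replacements.items():
--         for p in range(len(input_string) - len(word) + 1):
--             if input_string[p:p + len(word)] == word:
--                 matches.append((p, digit))
--     matches.sort(key=lambda t: t[0])
--     return ''.join(d for _, d in matches)
-- ===== Notes on version B (the rewrite author's own statement) =====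
-- stated objective: alternative
-- what changed: A is a single stateful scan that skips ahead after a word match; B instead builds an index of all matches (digit positions via enumerate, word occurrences via a per-word positional scan), sorts the (position, digit) pairs and joins the digits, relying on the fact that no number-word starts strictly inside another.
import Mathlib
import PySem

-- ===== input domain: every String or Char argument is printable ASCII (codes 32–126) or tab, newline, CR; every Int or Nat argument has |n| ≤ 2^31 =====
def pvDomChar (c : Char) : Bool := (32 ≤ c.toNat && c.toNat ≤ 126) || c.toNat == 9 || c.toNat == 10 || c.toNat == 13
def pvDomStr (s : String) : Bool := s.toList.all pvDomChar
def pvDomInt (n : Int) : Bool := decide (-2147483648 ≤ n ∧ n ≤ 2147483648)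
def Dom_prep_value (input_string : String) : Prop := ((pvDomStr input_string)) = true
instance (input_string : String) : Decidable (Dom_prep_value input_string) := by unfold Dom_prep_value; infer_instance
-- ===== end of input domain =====

-- B builds an index of all digit/word matches, sorts by position and joins, instead of A's stateful skip-ahead scan (alternative decomposition, same cost).

-- ===== PORT A =====
-- the replacements dict, in insertion order
def pvWords : List (List Char × Char) :=
  [("one".toList, '1'), ("two".toList, '2'), ("three".toList, '3'),
   ("four".toList, '4'), ("five".toList, '5'), ("six".toList, '6'),
   ("seven".toList, '7'), ("eight".toList, '8'), ("nine".toList, '9')]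

-- every word has length ≥ 3 (cited by pvLoopA's decreasing_by)
theorem pvWords_len : ∀ wd ∈ pvWords, 3 ≤ wd.1.length := by
  have h : pvWords.all (fun wd => decide (3 ≤ wd.1.length)) = true := by decide
  simpa only [List.all_eq_true, decide_eq_true_eq] using h

-- the while loop of A: i is the cursor, emitted chars are consed
def pvLoopA (cs : List Char) (i : Nat) : List Char :=
  if h : i < cs.length then
    if PySem.Chars.isdigit cs[i] then
      cs[i] :: pvLoopA cs (i + 1)
    else
      match hf : pvWords.find? (fun wd =>
          PySem.List.slice cs (some (i : Int)) (some ((i : Int) + (wd.1.length : Int))) == wd.1) with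
      | some wd => wd.2 :: pvLoopA cs (i + (wd.1.length - 1))
      | none => pvLoopA cs (i + 1)
  else []
termination_by cs.length - i
decreasing_by
  · omega
  · have hm := List.mem_of_find?_eq_some hf
    have := pvWords_len _ hm
    omega
  · omega

def prep_value (input_string : String) : String :=
  String.ofList (pvLoopA input_string.toList 0)

-- ===== PORT B =====
def prep_value_alt (input_string : String) : String :=
  String.ofList ((PySem.List.sorted
    (pvWords.foldl (fun acc wd =>
      acc ++ (PySem.List.pyRange 0 ((input_string.toList.length : Int) - (wd.1.length : Int) + 1) 1).filterMap
        (fun p => if PySem.List.slice input_string.toList (some p) (some (p + (wd.1.length : Int))) == wd.1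
                  then some (p, wd.2) else none))
      ((PySem.List.enumerate input_string.toList 0).filter (fun ic => PySem.Chars.isdigit ic.2)))
    (fun t => t.1) false).map (fun t => t.2))

-- ===== PRECONDITION & SPEC =====
def Spec_prep_value (input_string : String) (out : String) : Prop := out = prep_value_alt input_string
instance (input_string : String) (out : String) : Decidable (Spec_prep_value input_string out) := by unfold Spec_prep_value; infer_instance

-- ===== CLAIM (what is proved, stated in full; the proofs are below) =====
def Claim_equal_prep_value : Prop := ∀ (input_string : String), Dom_prep_value input_string → Spec_prep_value input_string (prep_value input_string)

-- ===== LEMMAS AND PROOFS =====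

-- the match predicate at a Nat position, and the canonical per-position match value
def pvPred (cs : List Char) (p : Nat) (wd : List Char × Char) : Bool :=
  (cs.drop p).take wd.1.length == wd.1

def pvMatchAt (cs : List Char) (p : Nat) : Option Char :=
  if p < cs.length then
    if PySem.Chars.isdigit (cs.getD p ' ') then some (cs.getD p ' ')
    else (pvWords.find? (pvPred cs p)).map (fun wd => wd.2)
  else none

def pvPairs (cs : List Char) : List (Int × Char) :=
  (List.range cs.length).filterMap (fun p => (pvMatchAt cs p).map (fun d => ((p : Int), d)))

-- finite facts about the word set
theorem pvWords_nodigit : ∀ wd ∈ pvWords, ∀ c ∈ wd.1, PySem.Chars.isdigit c = false := by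
  have h : pvWords.all (fun wd => wd.1.all (fun c => !PySem.Chars.isdigit c)) = true := by decide
  simpa only [List.all_eq_true, Bool.not_eq_true'] using h
theorem pvWords_nointerior : ∀ w1 ∈ pvWords, ∀ w2 ∈ pvWords, ∀ k, 1 ≤ k → k + 2 ≤ w1.1.length →
    ¬(w1.1.getD k ' ' = w2.1.getD 0 ' ' ∧ w1.1.getD (k+1) ' ' = w2.1.getD 1 ' ') := by
  have h : pvWords.all (fun w1 => pvWords.all (fun w2 =>
      (List.range w1.1.length).all (fun k =>
        !(decide (1 ≤ k) && decide (k + 2 ≤ w1.1.length) &&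
          (w1.1.getD k ' ' == w2.1.getD 0 ' ') && (w1.1.getD (k+1) ' ' == w2.1.getD 1 ' '))))) = true := by
    decide
  simp only [List.all_eq_true, List.mem_range] at h
  intro w1 h1 w2 h2 k hk1 hk2 he
  have := h w1 h1 w2 h2 k (by omega)
  simp only [List.getD_eq_getElem?_getD] at he
  simp [hk1, hk2, he.1, he.2] at this
theorem pvWords_prefixfree : ∀ w1 ∈ pvWords, ∀ w2 ∈ pvWords,
    w1.1 = w2.1.take w1.1.length → w1 = w2 := by
  have h : pvWords.all (fun w1 => pvWords.all (fun w2 =>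
      !(w1.1 == w2.1.take w1.1.length) || (w1 == w2))) = true := by decide
  simp only [List.all_eq_true] at h
  intro w1 h1 w2 h2 he
  have := h w1 h1 w2 h2
  rw [beq_iff_eq.mpr he] at this
  simpa using this
theorem pvWords_snd_pairwise : pvWords.Pairwise (fun a b => a.2 ≠ b.2) := by decide

theorem match_bound {cs : List Char} {p : Nat} {wd : List Char × Char}
    (hwd : wd ∈ pvWords) (h : (cs.drop p).take wd.1.length = wd.1) :
    p + wd.1.length ≤ cs.length := by
  have h3 := pvWords_len _ hwd
  have := congrArg List.length h
  simp [List.length_take, List.length_drop] at this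
  omega

theorem match_char {cs : List Char} {p : Nat} {wd : List Char × Char}
    (hwd : wd ∈ pvWords) (h : (cs.drop p).take wd.1.length = wd.1) :
    ∀ k < wd.1.length, cs.getD (p + k) ' ' = wd.1.getD k ' ' := by
  intro k hk
  have hb := match_bound hwd h
  have : ((cs.drop p).take wd.1.length).getD k ' ' = wd.1.getD k ' ' := by rw [h]
  rw [← this]
  simp [List.getD_eq_getElem?_getD, List.getElem?_drop, hk]

-- find? returns the unique matching word
-- two simultaneous matches at the same position are prefix-related, hence equal
theorem match_unique {cs : List Char} {p : Nat} {w1 w2 : List Char × Char}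
    (h1 : w1 ∈ pvWords) (e1 : (cs.drop p).take w1.1.length = w1.1)
    (h2 : w2 ∈ pvWords) (e2 : (cs.drop p).take w2.1.length = w2.1) : w1 = w2 := by
  rcases le_total w1.1.length w2.1.length with hle | hle
  · apply pvWords_prefixfree _ h1 _ h2
    calc w1.1 = (cs.drop p).take w1.1.length := e1.symm
      _ = ((cs.drop p).take w2.1.length).take w1.1.length := by
            rw [List.take_take, Nat.min_eq_left hle]
      _ = w2.1.take w1.1.length := by rw [e2]
  · refine (pvWords_prefixfree _ h2 _ h1 ?_).symm
    calc w2.1 = (cs.drop p).take w2.1.length := e2.symm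
      _ = ((cs.drop p).take w1.1.length).take w2.1.length := by
            rw [List.take_take, Nat.min_eq_left hle]
      _ = w1.1.take w2.1.length := by rw [e1]

theorem find?_eq_of_match {cs : List Char} {p : Nat} {wd : List Char × Char}
    (hwd : wd ∈ pvWords) (h : (cs.drop p).take wd.1.length = wd.1) :
    pvWords.find? (pvPred cs p) = some wd := by
  have hs : (pvWords.find? (pvPred cs p)).isSome := by
    apply List.find?_isSome.mpr
    exact ⟨wd, hwd, by simp [pvPred, h]⟩
  rcases Option.isSome_iff_exists.mp hs with ⟨wd', hf⟩
  have hp' := List.find?_some hf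
  have hm' := List.mem_of_find?_eq_some hf
  simp only [pvPred, beq_iff_eq] at hp'
  rw [hf, match_unique hwd h hm' hp']

-- no match starts strictly inside a matched word (except possibly at its last char)
theorem interior_none {cs : List Char} {p k : Nat} {wd : List Char × Char}
    (hwd : wd ∈ pvWords) (h : (cs.drop p).take wd.1.length = wd.1)
    (hk1 : 1 ≤ k) (hk2 : k + 2 ≤ wd.1.length) :
    pvMatchAt cs (p + k) = none := by
  have hb := match_bound hwd h
  have h3 := pvWords_len _ hwd
  have hlt : p + k < cs.length := by omega
  have hc1 : cs.getD (p + k) ' ' = wd.1.getD k ' ' := match_char hwd h k (by omega)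
  have hdig : PySem.Chars.isdigit (cs.getD (p + k) ' ') = false := by
    rw [hc1, List.getD_eq_getElem _ _ (show k < wd.1.length by omega)]
    exact pvWords_nodigit _ hwd _ (List.getElem_mem _)
  have hfind : pvWords.find? (pvPred cs (p + k)) = none := by
    apply List.find?_eq_none.mpr
    intro w2 hw2
    simp only [pvPred, beq_iff_eq]
    intro habs
    have h32 := pvWords_len _ hw2
    have e0 : cs.getD (p + k) ' ' = w2.1.getD 0 ' ' := by
      simpa using match_char hw2 habs 0 (by omega)
    have e1 : cs.getD (p + k + 1) ' ' = w2.1.getD 1 ' ' := by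
      simpa using match_char hw2 habs 1 (by omega)
    have hc2 : cs.getD (p + (k + 1)) ' ' = wd.1.getD (k + 1) ' ' :=
      match_char hwd h (k + 1) (by omega)
    refine pvWords_nointerior _ hwd _ hw2 k hk1 hk2 ⟨by rw [← hc1, e0], ?_⟩
    rw [← hc2, show p + (k + 1) = p + k + 1 from by omega, e1]
  unfold pvMatchAt
  rw [if_pos hlt, hdig, hfind]
  simp

-- ===== A-side =====
theorem loopA_eq (fuel : Nat) : ∀ (cs : List Char) (i : Nat), cs.length - i ≤ fuel →
    pvLoopA cs i = (List.range' i (cs.length - i)).filterMap (pvMatchAt cs) := by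
  induction fuel with
  | zero =>
    intro cs i hle
    rw [pvLoopA, dif_neg (by omega)]
    simp [show cs.length - i = 0 from by omega]
  | succ m ih =>
    intro cs i hle
    by_cases h : i < cs.length
    · rw [pvLoopA, dif_pos h]
      by_cases hd : PySem.Chars.isdigit cs[i]
      · rw [if_pos hd]
        have hM : pvMatchAt cs i = some cs[i] := by
          unfold pvMatchAt
          rw [if_pos h, List.getD_eq_getElem _ _ h, if_pos hd]
        rw [show cs.length - i = (cs.length - (i + 1)) + 1 from by omega, List.range'_succ]
        simp only [List.filterMap_cons, hM]
        rw [ih cs (i + 1) (by omega)]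
      · rw [if_neg hd]
        have hgd : cs.getD i ' ' = cs[i] := List.getD_eq_getElem _ _ h
        split
        · next wd hf =>
          simp only [PySem.List.slice_natCast_add] at hf
          have hf' : pvWords.find? (pvPred cs i) = some wd := hf
          have hmem := List.mem_of_find?_eq_some hf'
          have hmatch : (cs.drop i).take wd.1.length = wd.1 := by
            have := List.find?_some hf'
            simpa [pvPred] using this
          have h3 := pvWords_len _ hmem
          have hb := match_bound hmem hmatch
          have hM : pvMatchAt cs i = some wd.2 := by
            unfold pvMatchAt
            rw [if_pos h, hgd, if_neg (by simp [hd]), hf']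
            rfl
          have hsplit : List.range' i (cs.length - i)
              = i :: (List.range' (i + 1) (wd.1.length - 2)
                 ++ List.range' (i + (wd.1.length - 1)) (cs.length - (i + (wd.1.length - 1)))) := by
            rw [show cs.length - i = ((wd.1.length - 2) + (cs.length - (i + (wd.1.length - 1)))) + 1
                 from by omega, List.range'_succ]
            congr 1
            rw [show i + (wd.1.length - 1) = (i + 1) + 1 * (wd.1.length - 2) from by omega]
            exact (List.range'_append).symm
          rw [hsplit]
          simp only [List.filterMap_cons, List.filterMap_append, hM]
          have hmid : (List.range' (i + 1) (wd.1.length - 2)).filterMap (pvMatchAt cs) = [] := by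
            apply List.filterMap_eq_nil_iff.mpr
            intro q hq
            rw [List.mem_range'_1] at hq
            rw [show q = i + (q - i) from by omega]
            exact interior_none hmem hmatch (by omega) (by omega)
          rw [hmid, ih cs (i + (wd.1.length - 1)) (by omega)]
          simp
        · next hf =>
          simp only [PySem.List.slice_natCast_add] at hf
          have hf' : pvWords.find? (pvPred cs i) = none := hf
          have hM : pvMatchAt cs i = none := by
            unfold pvMatchAt
            rw [if_pos h, hgd, if_neg (by simp [hd]), hf']
            rfl
          rw [show cs.length - i = (cs.length - (i + 1)) + 1 from by omega, List.range'_succ]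
          simp only [List.filterMap_cons, hM]
          rw [ih cs (i + 1) (by omega)]
    · rw [pvLoopA, dif_neg h]
      simp [show cs.length - i = 0 from by omega]

-- ===== B-side =====
def pvFd (cs : List Char) (p : Nat) : Option (Int × Char) :=
  if p < cs.length ∧ PySem.Chars.isdigit (cs.getD p ' ') then some ((p : Int), cs.getD p ' ') else none

def pvFw (cs : List Char) (p : Nat) : Option (Int × Char) :=
  if p < cs.length ∧ ¬PySem.Chars.isdigit (cs.getD p ' ') then
    (pvWords.find? (pvPred cs p)).map (fun wd => ((p : Int), wd.2))
  else none

def pvBlock (cs : List Char) (wd : List Char × Char) : List (Int × Char) :=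
  (PySem.List.pyRange 0 ((cs.length : Int) - (wd.1.length : Int) + 1) 1).filterMap
    (fun p => if PySem.List.slice cs (some p) (some (p + (wd.1.length : Int))) == wd.1
              then some (p, wd.2) else none)

theorem pair_or (cs : List Char) (p : Nat) :
    (pvMatchAt cs p).map (fun d => ((p : Int), d)) = (pvFd cs p).or (pvFw cs p) := by
  unfold pvMatchAt pvFd pvFw
  by_cases h : p < cs.length
  · by_cases hd : PySem.Chars.isdigit (cs.getD p ' ')
    · rw [if_pos h, if_pos hd, if_pos ⟨h, hd⟩, if_neg (fun hc => hc.2 hd)]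
      rfl
    · rw [if_pos h, if_neg hd, if_neg (fun hc => hd hc.2), if_pos ⟨h, hd⟩]
      simp only [Option.none_or, Option.map_map]
      cases List.find? (pvPred cs p) pvWords <;> rfl
  · rw [if_neg h, if_neg (fun hc => h hc.1), if_neg (fun hc => h hc.1)]
    rfl

theorem perm_or {α β : Type} (F f g : α → Option β) (hp : ∀ a, F a = (f a).or (g a))
    (hdisj : ∀ a, f a = none ∨ g a = none) :
    ∀ l : List α, (l.filterMap F).Perm (l.filterMap f ++ l.filterMap g) := by
  intro l
  induction l with
  | nil => simp
  | cons a l ih =>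
    have hF := hp a
    cases hf : f a with
    | some x =>
      have hg : g a = none := by
        rcases hdisj a with h' | h'
        · rw [hf] at h'; cases h'
        · exact h'
      rw [hf] at hF; simp at hF
      simp only [List.filterMap_cons, hF, hf, hg]
      exact ih.cons x
    | none =>
      rw [hf] at hF; simp at hF
      cases hg : g a with
      | none =>
        rw [hg] at hF
        simp only [List.filterMap_cons, hF, hf, hg]
        exact ih
      | some y =>
        rw [hg] at hF
        simp only [List.filterMap_cons, hF, hf, hg]
        exact (ih.cons y).trans (List.perm_middle).symm

theorem pairwise_key_filterMap {ι β : Type} (g : ι → Int) (key : β → Int) (f : ι → Option β)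
    (hf : ∀ p x, f p = some x → key x = g p) :
    ∀ l : List ι, l.Pairwise (fun a b => g a < g b) →
      (l.filterMap f).Pairwise (fun a b => key a < key b) := by
  intro l hl
  induction l with
  | nil => simp
  | cons a l ih =>
    rw [List.pairwise_cons] at hl
    simp only [List.filterMap_cons]
    cases hfa : f a with
    | none => exact ih hl.2
    | some x =>
      refine List.Pairwise.cons ?_ (ih hl.2)
      intro y hy
      rcases List.mem_filterMap.mp hy with ⟨p, hpl, hfp⟩
      rw [hf a x hfa, hf p y hfp]
      exact hl.1 p hpl

theorem nodup_of_pairwise_fst_lt {l : List (Int × Char)}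
    (h : l.Pairwise (fun a b => a.1 < b.1)) : l.Nodup :=
  h.imp (fun hlt heq => absurd (heq ▸ hlt) (lt_irrefl _))

theorem enumerate_eq (cs : List Char) :
    PySem.List.enumerate cs 0 = (List.range cs.length).map (fun (k : Nat) => ((k : Int), cs.getD k ' ')) := by
  rw [show PySem.List.enumerate cs 0 = PySem.List.enumerate cs from rfl,
      PySem.List.enumerate_eq_map_pyRange cs ' ', PySem.List.pyRange_one,
      show ((PySem.List.len cs : Int) - 0).toNat = cs.length by simp [PySem.List.len],
      List.map_map]
  apply List.map_congr_left
  intro k hk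
  simp [Function.comp, PySem.List.pyGetD_natCast]

theorem map_filter_eq_filterMap {α β : Type} (f : α → β) (q : β → Bool) :
    ∀ l : List α, (l.map f).filter q = l.filterMap (fun a => if q (f a) then some (f a) else none) := by
  intro l
  induction l with
  | nil => rfl
  | cons a l ih =>
    simp only [List.map_cons, List.filter_cons, List.filterMap_cons]
    by_cases h : q (f a) <;> simp [h, ih]

theorem digit_eq (cs : List Char) :
    (PySem.List.enumerate cs 0).filter (fun ic => PySem.Chars.isdigit ic.2)
      = (List.range cs.length).filterMap (pvFd cs) := by
  rw [enumerate_eq, map_filter_eq_filterMap]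
  apply List.filterMap_congr
  intro p hp
  rw [List.mem_range] at hp
  unfold pvFd
  simp [hp]

theorem snd_of_mem_block {cs : List Char} {wd : List Char × Char} {x : Int × Char}
    (hx : x ∈ pvBlock cs wd) : x.2 = wd.2 := by
  unfold pvBlock at hx
  rcases List.mem_filterMap.mp hx with ⟨p, _, hfp⟩
  split at hfp
  · cases hfp; rfl
  · cases hfp

theorem mem_block {cs : List Char} {wd : List Char × Char} (hwd : wd ∈ pvWords) {x : Int × Char} :
    x ∈ pvBlock cs wd ↔ ∃ q : Nat, (cs.drop q).take wd.1.length = wd.1 ∧ x = ((q : Int), wd.2) := by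
  have h3 := pvWords_len _ hwd
  unfold pvBlock
  rw [List.mem_filterMap]
  constructor
  · rintro ⟨p, hp, hfp⟩
    rw [PySem.List.mem_pyRange_one] at hp
    split at hfp
    · next hsl =>
      rw [beq_iff_eq, PySem.List.slice_toNat cs hp.1 (by omega)] at hsl
      rw [show ((p + (wd.1.length : Int)).toNat - p.toNat) = wd.1.length from by omega] at hsl
      cases hfp
      exact ⟨p.toNat, hsl, by rw [Int.toNat_of_nonneg hp.1]⟩
    · cases hfp
  · rintro ⟨q, hq, rfl⟩
    have hb := match_bound hwd hq
    refine ⟨(q : Int), ?_, ?_⟩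
    · rw [PySem.List.mem_pyRange_one]
      constructor
      · omega
      · omega
    · rw [show PySem.List.slice cs (some (q : Int)) (some ((q : Int) + (wd.1.length : Int)))
            = (cs.drop q).take wd.1.length from PySem.List.slice_natCast_add cs q wd.1.length]
      simp [hq]

theorem mem_fw {cs : List Char} {x : Int × Char} :
    x ∈ (List.range cs.length).filterMap (pvFw cs) ↔
      ∃ wd ∈ pvWords, ∃ q : Nat, (cs.drop q).take wd.1.length = wd.1 ∧ x = ((q : Int), wd.2) := by
  rw [List.mem_filterMap]
  constructor
  · rintro ⟨p, _, hfp⟩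
    unfold pvFw at hfp
    split at hfp
    · rcases Option.map_eq_some_iff.mp hfp with ⟨wd, hfind, rfl⟩
      have hmem := List.mem_of_find?_eq_some hfind
      have hmatch : (cs.drop p).take wd.1.length = wd.1 := by
        have := List.find?_some hfind
        simpa [pvPred] using this
      exact ⟨wd, hmem, p, hmatch, rfl⟩
    · cases hfp
  · rintro ⟨wd, hwd, q, hq, rfl⟩
    have hb := match_bound hwd hq
    have h3 := pvWords_len _ hwd
    refine ⟨q, by rw [List.mem_range]; omega, ?_⟩
    unfold pvFw
    have hnd : PySem.Chars.isdigit (cs.getD q ' ') = false := by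
      have hc : cs.getD (q + 0) ' ' = wd.1.getD 0 ' ' := match_char hwd hq 0 (by omega)
      rw [show q + 0 = q from rfl] at hc
      rw [hc, List.getD_eq_getElem _ _ (show 0 < wd.1.length by omega)]
      exact pvWords_nodigit _ hwd _ (List.getElem_mem _)
    rw [if_pos ⟨by omega, by rw [hnd]; simp⟩, find?_eq_of_match hwd hq]
    rfl

theorem block_nodup (cs : List Char) (wd : List Char × Char) : (pvBlock cs wd).Nodup := by
  apply nodup_of_pairwise_fst_lt
  apply pairwise_key_filterMap (fun p : Int => p) (fun x : Int × Char => x.1)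
  · intro p x hfp
    split at hfp
    · cases hfp; rfl
    · cases hfp
  · exact PySem.List.pairwise_lt_pyRange_one 0 _

theorem flatMap_nodup (cs : List Char) : (pvWords.flatMap (pvBlock cs)).Nodup := by
  rw [List.nodup_flatMap]
  constructor
  · intro wd _
    exact block_nodup cs wd
  · apply pvWords_snd_pairwise.imp
    intro a b hne x hxa hxb
    exact hne ((snd_of_mem_block hxa).symm.trans (snd_of_mem_block hxb))

theorem fw_nodup (cs : List Char) : ((List.range cs.length).filterMap (pvFw cs)).Nodup := by
  apply nodup_of_pairwise_fst_lt
  apply pairwise_key_filterMap (fun p : Nat => (p : Int)) (fun x : Int × Char => x.1)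
  · intro p x hfp
    unfold pvFw at hfp
    split at hfp
    · rcases Option.map_eq_some_iff.mp hfp with ⟨wd, _, rfl⟩
      rfl
    · cases hfp
  · exact (List.pairwise_lt_range).imp (fun h => by exact_mod_cast h)

theorem flatMap_perm (cs : List Char) :
    (pvWords.flatMap (pvBlock cs)).Perm ((List.range cs.length).filterMap (pvFw cs)) := by
  rw [List.perm_ext_iff_of_nodup (flatMap_nodup cs) (fw_nodup cs)]
  intro x
  rw [mem_fw, List.mem_flatMap]
  constructor
  · rintro ⟨wd, hwd, hx⟩
    exact ⟨wd, hwd, (mem_block hwd).mp hx⟩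
  · rintro ⟨wd, hwd, hq⟩
    exact ⟨wd, hwd, (mem_block hwd).mpr hq⟩

theorem pairs_pairwise (cs : List Char) :
    (pvPairs cs).Pairwise (fun a b => a.1 < b.1) := by
  unfold pvPairs
  apply pairwise_key_filterMap (fun p : Nat => (p : Int)) (fun x : Int × Char => x.1)
  · intro p x hfp
    rcases Option.map_eq_some_iff.mp hfp with ⟨d, _, rfl⟩
    rfl
  · exact (List.pairwise_lt_range).imp (fun h => by exact_mod_cast h)

theorem pairs_perm (cs : List Char) :
    (pvPairs cs).Perm
      (((PySem.List.enumerate cs 0).filter (fun ic => PySem.Chars.isdigit ic.2))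
        ++ pvWords.flatMap (pvBlock cs)) := by
  unfold pvPairs
  refine (perm_or _ (pvFd cs) (pvFw cs) (pair_or cs) ?_ (List.range cs.length)).trans ?_
  · intro p
    unfold pvFd pvFw
    by_cases h : p < cs.length
    · by_cases hd : PySem.Chars.isdigit (cs.getD p ' ')
      · right; exact if_neg (fun hc => hc.2 hd)
      · left; exact if_neg (fun hc => hd hc.2)
    · left; exact if_neg (fun hc => h hc.1)
  rw [digit_eq]
  exact List.Perm.append (List.Perm.refl _) (flatMap_perm cs).symm

theorem map_snd_pairs (cs : List Char) :
    (pvPairs cs).map (fun t => t.2) = (List.range cs.length).filterMap (pvMatchAt cs) := by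
  unfold pvPairs
  rw [List.map_filterMap]
  apply List.filterMap_congr
  intro p _
  cases pvMatchAt cs p <;> rfl

theorem B_eq (s : String) : prep_value_alt s
    = String.ofList ((List.range s.toList.length).filterMap (pvMatchAt s.toList)) := by
  unfold prep_value_alt
  rw [PySem.List.foldl_append_eq_flatMap]
  rw [show (fun wd : List Char × Char =>
        (PySem.List.pyRange 0 ((s.toList.length : Int) - (wd.1.length : Int) + 1) 1).filterMap
          (fun p => if PySem.List.slice s.toList (some p) (some (p + (wd.1.length : Int))) == wd.1
                    then some (p, wd.2) else none)) = pvBlock s.toList from rfl]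
  rw [PySem.List.sorted_eq_of_perm_of_pairwise_lt _ (pvPairs s.toList) (fun t => t.1)
        (pairs_perm s.toList) (pairs_pairwise s.toList)]
  rw [map_snd_pairs]

theorem A_eq (s : String) : prep_value s
    = String.ofList ((List.range s.toList.length).filterMap (pvMatchAt s.toList)) := by
  unfold prep_value
  rw [loopA_eq (s.toList.length) s.toList 0 (by omega)]
  simp [List.range_eq_range']

-- ===== VERDICT (by name: the statement is the Claim_ definition above) =====
theorem prep_value_spec : Claim_equal_prep_value := by
  intro s _
  unfold Spec_prep_value
  exact (A_eq s).trans (B_eq s).symm
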